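-- pv_equiv track=rewrite | github.com/christianniebling/peak_detector | functions.py | anthonys_request
-- ===== SOURCE A (Python) =====
-- def anthonys_request(input):
--     # Combine like up / down intervals.
--     # input should be an array consisting of 0, 1, -1 where:
--     # 1 = up interval measured
--     # -1 = down interval measured
--     # 0 = neither up nor down
--     working = input.copy()
--     i = 0
--     while i < (len(working) - 1):
--         if working[i] == working[i + 1] and (working[i] == 1 or working[i] == -1):
--             working[i + 1] = 0
--             i += 1
--         i += 1
--
--     return working
-- ===== SOURCE B (Python) =====
-- def anthonys_request(input):
--     # One pass building the output list with a run-parity counter instead of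
--     # index skipping over a mutated copy.
--     out = []
--     prev = None
--     run = 0
--     for x in input:
--         if prev is not None and x == prev and (x == 1 or x == -1):
--             run += 1
--             out.append(0 if run % 2 == 1 else x)
--         else:
--             run = 0
--             out.append(x)
--         prev = x
--     return out
-- ===== Notes on version B (the rewrite author's own statement) =====
-- stated objective: simpler
-- what changed: Replaces A's while loop that mutates a copy and skips indices after each zeroing by a single forward pass that builds the output list with a run-parity counter over the original values.
import Mathlib
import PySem

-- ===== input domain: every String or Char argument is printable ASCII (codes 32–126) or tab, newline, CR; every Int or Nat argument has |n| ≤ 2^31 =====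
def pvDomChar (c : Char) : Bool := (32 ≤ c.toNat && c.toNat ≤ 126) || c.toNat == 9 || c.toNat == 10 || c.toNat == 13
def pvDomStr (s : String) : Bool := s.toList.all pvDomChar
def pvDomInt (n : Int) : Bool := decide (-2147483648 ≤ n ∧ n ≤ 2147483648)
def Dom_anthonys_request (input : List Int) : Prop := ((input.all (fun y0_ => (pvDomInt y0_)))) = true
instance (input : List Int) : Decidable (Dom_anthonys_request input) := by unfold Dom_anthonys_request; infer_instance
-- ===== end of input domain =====

-- B replaces A's index-skipping while loop over a mutated copy by a single pass
-- building the output with a run-parity counter (objective: simpler).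

-- ===== PORT A =====
-- the while loop of A; indices i, i+1 are in bounds whenever read (i < len-1), so getD is exact
def anthonysLoopA (w : List Int) (i : Nat) : List Int :=
  if _h : i < w.length - 1 then
    if (w.getD i 0 = w.getD (i + 1) 0) ∧ (w.getD i 0 = 1 ∨ w.getD i 0 = -1) then
      anthonysLoopA (w.set (i + 1) 0) (i + 2)
    else
      anthonysLoopA w (i + 1)
  else w
termination_by w.length - i
decreasing_by
  · simp only [List.length_set]; omega
  · omega

def anthonys_request (input : List Int) : List Int :=
  anthonysLoopA input 0

-- ===== PORT B =====
-- the for loop of B: state = (prev, run), output appended element by element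
def anthonysLoopB (prev : Option Int) (run : Nat) : List Int → List Int
  | [] => []
  | x :: xs =>
    if (prev = some x) ∧ (x = 1 ∨ x = -1) then
      (if (run + 1) % 2 = 1 then (0 : Int) else x) :: anthonysLoopB (some x) (run + 1) xs
    else
      x :: anthonysLoopB (some x) 0 xs

def anthonys_request_alt (input : List Int) : List Int :=
  anthonysLoopB none 0 input

-- ===== PRECONDITION & SPEC =====
def Spec_anthonys_request (input : List Int) (out : List Int) : Prop := out = anthonys_request_alt input
instance (input : List Int) (out : List Int) : Decidable (Spec_anthonys_request input out) := by unfold Spec_anthonys_request; infer_instance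

-- ===== CLAIM (what is proved, stated in full; the proofs are below) =====
def Claim_equal_anthonys_request : Prop := ∀ (input : List Int), Dom_anthonys_request input → Spec_anthonys_request input (anthonys_request input)

-- ===== LEMMAS AND PROOFS =====

-- pure recursive characterisation of A's loop on the unprocessed suffix
def fA : List Int → List Int
  | [] => []
  | [x] => [x]
  | x :: y :: xs =>
    if x = y ∧ (x = 1 ∨ x = -1) then x :: 0 :: fA xs else x :: fA (y :: xs)

theorem getD_append_len (pre : List Int) (x : Int) (rest : List Int) (d : Int) :
    (pre ++ x :: rest).getD pre.length d = x := by
  induction pre with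
  | nil => simp
  | cons a t ih => simpa using ih

theorem getD_append_len1 (pre : List Int) (x y : Int) (rest : List Int) (d : Int) :
    (pre ++ x :: y :: rest).getD (pre.length + 1) d = y := by
  have h := getD_append_len (pre ++ [x]) y rest d
  simpa using h

theorem set_append_len1 (pre : List Int) (x y : Int) (rest : List Int) :
    (pre ++ x :: y :: rest).set (pre.length + 1) 0 = pre ++ x :: 0 :: rest := by
  induction pre with
  | nil => simp
  | cons a t ih => simpa using ih

theorem loopA_char : ∀ (n : Nat) (xs pre : List Int), xs.length ≤ n →
    anthonysLoopA (pre ++ xs) pre.length = pre ++ fA xs := by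
  intro n
  induction n with
  | zero =>
    intro xs pre h
    have hx : xs = [] := List.length_eq_zero_iff.mp (Nat.le_zero.mp h)
    subst hx
    rw [anthonysLoopA]
    simp [fA]
  | succ n ih =>
    intro xs pre h
    match xs with
    | [] => rw [anthonysLoopA]; simp [fA]
    | [x] =>
      rw [anthonysLoopA]
      simp [fA]
    | x :: y :: rest =>
      rw [anthonysLoopA]
      have hlt : pre.length < (pre ++ x :: y :: rest).length - 1 := by
        simp
      rw [dif_pos hlt, getD_append_len, getD_append_len1]
      by_cases hc : x = y ∧ (x = 1 ∨ x = -1)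
      · rw [if_pos hc, set_append_len1]
        have hre : pre ++ x :: 0 :: rest = (pre ++ [x, 0]) ++ rest := by simp
        have hlen : pre.length + 2 = (pre ++ [x, 0]).length := by simp
        rw [hre, hlen, ih rest (pre ++ [x, 0]) (by simp at h ⊢; omega)]
        simp only [fA, if_pos hc]
        simp
      · rw [if_neg hc]
        have hre : pre ++ x :: y :: rest = (pre ++ [x]) ++ y :: rest := by simp
        have hlen : pre.length + 1 = (pre ++ [x]).length := by simp
        rw [hre, hlen, ih (y :: rest) (pre ++ [x]) (by simp at h ⊢; omega)]
        simp only [fA, if_neg hc]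
        simp

-- combined bridge between fA and B's loop:
--  (1) f (x :: xs) = x :: B-loop continuing after a fresh element x with run = 0
--  (2) in the middle of a run (run odd), the B-loop restarts exactly as fA does
theorem fA_bLoop : ∀ (n : Nat) (xs : List Int), xs.length ≤ n →
    (∀ x, fA (x :: xs) = x :: anthonysLoopB (some x) 0 xs) ∧
    (∀ r, r % 2 = 1 → ∀ y, anthonysLoopB (some y) r xs = fA xs) := by
  intro n
  induction n with
  | zero =>
    intro xs h
    have hx : xs = [] := List.length_eq_zero_iff.mp (Nat.le_zero.mp h)
    subst hx
    exact ⟨fun x => by simp [fA, anthonysLoopB], fun r _ y => by simp [fA, anthonysLoopB]⟩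
  | succ n ih =>
    intro xs h
    constructor
    · intro x
      match xs with
      | [] => simp [fA, anthonysLoopB]
      | y :: ys =>
        by_cases hc : x = y ∧ (x = 1 ∨ x = -1)
        · have hc' : (some x = some y) ∧ (y = 1 ∨ y = -1) := by
            obtain ⟨h1, h2⟩ := hc; subst h1; exact ⟨rfl, h2⟩
          rw [fA, if_pos hc, anthonysLoopB, if_pos hc']
          have := (ih ys (by simp at h; omega)).2 1 rfl y
          simp [this]

        · have hc' : ¬ ((some x = some y) ∧ (y = 1 ∨ y = -1)) := by
            intro ⟨h1, h2⟩
            exact hc ⟨by injection h1, by injection h1 with he; rw [he]; exact h2⟩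
          rw [fA, if_neg hc, anthonysLoopB, if_neg hc']
          have := (ih ys (by simp at h; omega)).1 y
          rw [this]
    · intro r hr y
      match xs with
      | [] => simp [fA, anthonysLoopB]
      | z :: zs =>
        by_cases hc : (some y = some z) ∧ (z = 1 ∨ z = -1)
        · rw [anthonysLoopB, if_pos hc]
          have hrp : ¬ ((r + 1) % 2 = 1) := by omega
          rw [if_neg hrp]
          match zs with
          | [] =>
            simp [fA, anthonysLoopB]
          | u :: us =>
            by_cases hc2 : (some z = some u) ∧ (u = 1 ∨ u = -1)
            · rw [anthonysLoopB, if_pos hc2]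
              have hrp2 : (r + 1 + 1) % 2 = 1 := by omega
              rw [if_pos hrp2]
              have hcf : z = u ∧ (z = 1 ∨ z = -1) := by
                obtain ⟨h1, h2⟩ := hc2
                have he : z = u := by injection h1
                exact ⟨he, by rw [he]; exact h2⟩
              rw [fA, if_pos hcf]
              have := (ih us (by simp at h; omega)).2 (r + 1 + 1) (by omega) u
              rw [this]
            · rw [anthonysLoopB, if_neg hc2]
              have hcf : ¬ (z = u ∧ (z = 1 ∨ z = -1)) := by
                intro ⟨h1, h2⟩
                exact hc2 ⟨by rw [h1], by rw [← h1]; exact h2⟩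
              rw [fA, if_neg hcf]
              have := (ih us (by simp at h; omega)).1 u
              rw [this]
        · rw [anthonysLoopB, if_neg hc]
          have := (ih zs (by simp at h; omega)).1 z
          rw [this]

theorem fA_eq_alt (xs : List Int) : fA xs = anthonys_request_alt xs := by
  unfold anthonys_request_alt
  match xs with
  | [] => simp [fA, anthonysLoopB]
  | x :: rest =>
    rw [anthonysLoopB]
    have hn : ¬ (((none : Option Int) = some x) ∧ (x = 1 ∨ x = -1)) := by
      intro ⟨h1, _⟩; simp at h1
    rw [if_neg hn]
    exact (fA_bLoop rest.length rest le_rfl).1 x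

-- ===== VERDICT (by name: the statement is the Claim_ definition above) =====
theorem anthonys_request_spec : Claim_equal_anthonys_request := by
  intro input _
  unfold Spec_anthonys_request anthonys_request
  have h := loopA_char input.length input [] le_rfl
  simpa [fA_eq_alt] using h
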